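-- pv_equiv track=rewrite | github.com/mcornelison/OBD2 | tests/pi/data/test_data_source_hygiene.py | _sqlInsertTable
-- ===== SOURCE A (Python) =====
-- def _sqlInsertTable(sql: str) -> str | None:
--     """Return the target table name of an ``INSERT INTO`` SQL literal.
--
--     Returns ``None`` when ``sql`` is not an INSERT statement.
--     """
--     stripped = sql.lstrip()
--     upper = stripped.upper()
--     if not upper.startswith("INSERT INTO"):
--         return None
--     remainder = stripped[len("INSERT INTO"):].lstrip()
--     # Table name ends at whitespace, paren, or newline.
--     tokenEnd = len(remainder)
--     for i, ch in enumerate(remainder):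
--         if ch in (" ", "\t", "\n", "(",):
--             tokenEnd = i
--             break
--     return remainder[:tokenEnd].strip()
-- ===== SOURCE B (Python) =====
-- import re
--
-- # One regex does the whole job: optional leading whitespace, the literal
-- # "insert into" (case-insensitive, single space, exactly as A checks it),
-- # optional whitespace, then the table token up to the first space/tab/newline/paren.
-- _INSERT_RE = re.compile(r"\s*insert into\s*([^ \t\n(]*)", re.IGNORECASE)
--
-- def _sqlInsertTable(sql: str) -> str | None:
--     m = _INSERT_RE.match(sql)
--     return m.group(1).strip() if m else None
-- ===== Notes on version B (the rewrite author's own statement) =====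
-- stated objective: idiomatic
-- what changed: A's manual lstrip/upper/startswith/slice pipeline with an indexed break-loop for the token end is replaced by a single precompiled case-insensitive regex match whose capture group is the table token.
import Mathlib
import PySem

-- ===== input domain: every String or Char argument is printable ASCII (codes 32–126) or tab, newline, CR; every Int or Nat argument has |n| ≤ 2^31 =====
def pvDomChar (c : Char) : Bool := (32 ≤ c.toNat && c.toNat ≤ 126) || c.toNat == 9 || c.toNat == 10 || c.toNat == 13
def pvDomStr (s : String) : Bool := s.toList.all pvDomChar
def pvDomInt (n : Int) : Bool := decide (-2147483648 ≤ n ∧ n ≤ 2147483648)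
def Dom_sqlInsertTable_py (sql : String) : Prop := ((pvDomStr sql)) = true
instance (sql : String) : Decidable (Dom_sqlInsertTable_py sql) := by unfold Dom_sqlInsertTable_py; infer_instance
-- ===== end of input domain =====

-- B replaces A's manual startswith/slice/scan pipeline with a single anchored
-- regex match (case-insensitive literal + capture up to the first delimiter);
-- objective: idiomatic. Return values agree on the whole domain.

-- ===== PORT A =====
-- the for-loop with break: first index whose char is a delimiter (none if no delimiter)
def pvFindDelimA : List Char → Option Nat
  | [] => none
  | c :: cs =>
    if c = ' ' ∨ c = '\t' ∨ c = '\n' ∨ c = '(' then some 0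
    else (pvFindDelimA cs).map (· + 1)

def sqlInsertTable_py (sql : String) : Option String :=
  let stripped := PySem.Chars.lstrip sql.toList            -- sql.lstrip()
  let upper := PySem.Chars.upper stripped                  -- stripped.upper()
  if ¬ (PySem.Chars.startswith upper "INSERT INTO".toList) then none
  else
    -- stripped[len("INSERT INTO"):].lstrip()
    let remainder := PySem.Chars.lstrip (PySem.List.slice stripped (some 11) none)
    let tokenEnd := (pvFindDelimA remainder).getD remainder.length
    -- remainder[:tokenEnd].strip()
    some (String.mk (PySem.Chars.strip (PySem.List.slice remainder none (some (tokenEnd : Int)))))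

-- ===== PORT B =====
-- regex \s, exact on the ASCII domain (Python's re whitespace class [ \t\n\r\f\v]; Dom only contains space/tab/\n/\r of these)
def pvReSpace (c : Char) : Bool :=
  c = ' ' || c = '\t' || c = '\n' || c = '\r' || c = '\x0b' || c = '\x0c'

-- match a literal pattern case-insensitively (re.IGNORECASE: compare lowercased input char
-- against the lowercase pattern char); returns the rest of the input after the literal
def pvMatchCI : List Char → List Char → Option (List Char)
  | [], s => some s
  | _ :: _, [] => none
  | p :: ps, c :: cs => if PySem.Chars.lowerChar c = p then pvMatchCI ps cs else none

-- hand-written port of _INSERT_RE.match(sql):  \s*  "insert into"  \s*  ([^ \t\n(]*)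
-- (exact for this regex: \s* is maximal-munch, the literal has no choice points,
--  and the capture [^ \t\n(]* is the maximal run of non-delimiter chars)
def sqlInsertTable_py_alt (sql : String) : Option String :=
  match pvMatchCI "insert into".toList (sql.toList.dropWhile pvReSpace) with
  | none => none
  | some rest =>
    let grp := (rest.dropWhile pvReSpace).takeWhile
        (fun c => ¬ (c = ' ' ∨ c = '\t' ∨ c = '\n' ∨ c = '('))
    some (String.mk (PySem.Chars.strip grp))               -- m.group(1).strip()

-- ===== PRECONDITION & SPEC =====
def Spec_sqlInsertTable_py (sql : String) (out : Option String) : Prop := out = sqlInsertTable_py_alt sql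
instance (sql : String) (out : Option String) : Decidable (Spec_sqlInsertTable_py sql out) := by unfold Spec_sqlInsertTable_py; infer_instance

-- ===== CLAIM (what is proved, stated in full; the proofs are below) =====
def Claim_equal_sqlInsertTable_py : Prop := ∀ (sql : String), Dom_sqlInsertTable_py sql → Spec_sqlInsertTable_py sql (sqlInsertTable_py sql)

-- ===== LEMMAS AND PROOFS =====

-- On domain chars, Python's str-whitespace (Chars.isspace) and regex \s agree.
theorem pvSpace_eq (c : Char) (h : pvDomChar c = true) :
    PySem.Chars.isspace c = pvReSpace c := by
  have hlt : c.toNat < 128 := by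
    simp only [pvDomChar, Bool.or_eq_true, Bool.and_eq_true, decide_eq_true_eq, beq_iff_eq] at h
    omega
  have h128 : ∀ n : Nat, n < 128 →
      (!(pvDomChar (Char.ofNat n)) ||
        (PySem.Chars.isspace (Char.ofNat n) == pvReSpace (Char.ofNat n))) = true := by decide
  have h2 := h128 c.toNat hlt
  rw [Char.ofNat_toNat] at h2
  simp only [h, Bool.not_true, Bool.false_or, beq_iff_eq] at h2
  exact h2

theorem dropWhile_congr_dom (l : List Char) (h : ∀ c ∈ l, pvDomChar c = true) :
    l.dropWhile PySem.Chars.isspace = l.dropWhile pvReSpace := by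
  induction l with
  | nil => rfl
  | cons c cs ih =>
    have hc := h c (List.mem_cons_self ..)
    simp only [List.dropWhile_cons, pvSpace_eq c hc]
    split
    · exact ih (fun x hx => h x (List.mem_cons_of_mem _ hx))
    · rfl

-- one pattern position: (upperChar c = P) ↔ (lowerChar c = p) for the pairs of
-- "INSERT INTO" / "insert into", for any domain char c
theorem pvCharCI (P p : Char)
    (hb : ∀ n : Nat, n < 128 →
      (decide (PySem.Chars.upperChar (Char.ofNat n) = P)
        == decide (PySem.Chars.lowerChar (Char.ofNat n) = p)) = true)
    (c : Char) (hc : pvDomChar c = true) :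
    (PySem.Chars.upperChar c = P) ↔ (PySem.Chars.lowerChar c = p) := by
  have hlt : c.toNat < 128 := by
    simp only [pvDomChar, Bool.or_eq_true, Bool.and_eq_true, decide_eq_true_eq, beq_iff_eq] at hc
    omega
  have h2 := hb c.toNat hlt
  rw [Char.ofNat_toNat] at h2
  simpa [beq_iff_eq, decide_eq_decide] using h2

def pvCIRel (P p : Char) : Prop :=
  ∀ c : Char, pvDomChar c = true →
    ((PySem.Chars.upperChar c = P) ↔ (PySem.Chars.lowerChar c = p))

theorem pvPatRel :
    List.Forall₂ pvCIRel "INSERT INTO".toList "insert into".toList := by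
  show List.Forall₂ pvCIRel
    ['I','N','S','E','R','T',' ','I','N','T','O'] ['i','n','s','e','r','t',' ','i','n','t','o']
  repeat' constructor
  all_goals exact pvCharCI _ _ (by decide)

-- pvMatchCI computes exactly "uppercased prefix equals PAT, rest = drop PAT.length"
theorem pvMatchCI_spec (PAT pat : List Char) (hrel : List.Forall₂ pvCIRel PAT pat) :
    ∀ (l : List Char), (∀ c ∈ l, pvDomChar c = true) →
      pvMatchCI pat l =
        if PAT.isPrefixOf (PySem.Chars.upper l) then some (l.drop PAT.length) else none := by
  induction hrel with
  | nil => intro l _; simp [pvMatchCI, List.isPrefixOf]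
  | @cons P p PS ps hPp _ ih =>
    intro l hl
    cases l with
    | nil => simp [pvMatchCI, PySem.Chars.upper]
    | cons c cs =>
      have hc := hl c (List.mem_cons_self ..)
      have hcs : ∀ x ∈ cs, pvDomChar x = true := fun x hx => hl x (List.mem_cons_of_mem _ hx)
      have hpref : (P :: PS).isPrefixOf (PySem.Chars.upper (c :: cs))
          = (P == PySem.Chars.upperChar c && PS.isPrefixOf (PySem.Chars.upper cs)) := rfl
      show (if PySem.Chars.lowerChar c = p then pvMatchCI ps cs else none) = _
      rw [hpref]
      by_cases hlc : PySem.Chars.lowerChar c = p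
      · have hup : PySem.Chars.upperChar c = P := (hPp c hc).mpr hlc
        rw [if_pos hlc, ih cs hcs, hup]
        simp
      · have hup : ¬ PySem.Chars.upperChar c = P := fun h => hlc ((hPp c hc).mp h)
        rw [if_neg hlc, if_neg]
        simp only [Bool.and_eq_true, beq_iff_eq]
        exact fun h => hup h.1.symm

-- A's indexed break-loop produces exactly takeWhile of the non-delimiter predicate
theorem pvTake_findDelimA (l : List Char) :
    l.take ((pvFindDelimA l).getD l.length) =
      l.takeWhile (fun c => ¬ (c = ' ' ∨ c = '\t' ∨ c = '\n' ∨ c = '(')) := by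
  induction l with
  | nil => rfl
  | cons c cs ih =>
    by_cases hd : c = ' ' ∨ c = '\t' ∨ c = '\n' ∨ c = '('
    · rcases hd with h | h | h | h <;> simp [pvFindDelimA, h]
    · simp only [pvFindDelimA, if_neg hd, List.takeWhile_cons, decide_not]
      rw [if_pos (by simpa using hd)]
      cases h : pvFindDelimA cs with
      | none => simpa [h] using ih
      | some k => simpa [h] using ih

theorem pvSublistDom {l l' : List Char} (hs : List.Sublist l' l)
    (h : ∀ c ∈ l, pvDomChar c = true) : ∀ c ∈ l', pvDomChar c = true :=
  fun c hc => h c (hs.mem hc)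

-- ===== VERDICT (by name: the statement is the Claim_ definition above) =====
theorem sqlInsertTable_py_spec : Claim_equal_sqlInsertTable_py := by
  intro sql hdom
  unfold Spec_sqlInsertTable_py sqlInsertTable_py sqlInsertTable_py_alt
  have hdoml : ∀ c ∈ sql.toList, pvDomChar c = true := by
    simpa [Dom_sqlInsertTable_py, pvDomStr, List.all_eq_true] using hdom
  -- the two leading whitespace strips agree
  have hstrip : PySem.Chars.lstrip sql.toList = sql.toList.dropWhile pvReSpace := by
    simpa [PySem.Chars.lstrip] using dropWhile_congr_dom sql.toList hdoml
  set stripped := PySem.Chars.lstrip sql.toList with hstripped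
  have hdomS : ∀ c ∈ stripped, pvDomChar c = true :=
    pvSublistDom (by rw [hstripped]; exact List.dropWhile_sublist _) hdoml
  -- the regex literal match agrees with upper().startswith
  have hmatch := pvMatchCI_spec _ _ pvPatRel stripped hdomS
  rw [hstrip] at hmatch
  rw [hmatch]
  have hsw : PySem.Chars.startswith (PySem.Chars.upper stripped) "INSERT INTO".toList
      = "INSERT INTO".toList.isPrefixOf (PySem.Chars.upper (sql.toList.dropWhile pvReSpace)) := by
    rw [PySem.Chars.startswith, hstrip]
  by_cases hpre : ("INSERT INTO".toList.isPrefixOf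
      (PySem.Chars.upper (sql.toList.dropWhile pvReSpace))) = true
  · rw [if_pos hpre]
    simp only
    rw [if_neg (by rw [hsw]; exact not_not_intro hpre)]
    -- the remainder chains agree
    have hlen : ("INSERT INTO".toList).length = 11 := by decide
    have hdrop : PySem.List.slice stripped (some 11) none = stripped.drop 11 := by
      simpa using PySem.List.slice_from_natCast stripped 11
    have hdomD : ∀ c ∈ stripped.drop 11, pvDomChar c = true :=
      pvSublistDom (List.drop_sublist _ _) hdomS
    have hrem : PySem.Chars.lstrip (PySem.List.slice stripped (some 11) none)
        = ((sql.toList.dropWhile pvReSpace).drop ("INSERT INTO".toList).length).dropWhile pvReSpace := by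
      rw [hdrop, hlen, ← hstrip]
      simpa [PySem.Chars.lstrip] using dropWhile_congr_dom _ hdomD
    rw [← hrem]
    set remainder := PySem.Chars.lstrip (PySem.List.slice stripped (some 11) none)
    have htok : PySem.List.slice remainder none
        (some (((pvFindDelimA remainder).getD remainder.length : Nat) : Int))
        = remainder.takeWhile (fun c => ¬ (c = ' ' ∨ c = '\t' ∨ c = '\n' ∨ c = '(')) := by
      rw [PySem.List.slice_to_natCast]
      exact pvTake_findDelimA remainder
    rw [htok]
  · rw [if_neg hpre]
    simp only
    rw [if_pos (by rw [hsw]; exact hpre)]
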